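-- pv_equiv track=rewrite | github.com/AbdKayali3/adventofcode-22 | Dec6/1.py | CheckForUniqueCode
-- ===== SOURCE A (Python) =====
-- def CheckForUniqueCode(Plist, char):
--
--     for i in range(len(Plist)):
--         for j in range(i):
--             if(Plist[i] == Plist[j]):
--                 return False
--         if(Plist[i] == char):
--             return False
--
--     return True
-- ===== SOURCE B (Python) =====
-- def CheckForUniqueCode(Plist, char):
--     return len(set(Plist)) == len(Plist) and char not in Plist
-- ===== Notes on version B (the rewrite author's own statement) =====
-- stated objective: simpler
-- what changed: Replaces the nested pairwise duplicate scan and per-element char comparison with a single set-cardinality test plus one membership check, with no explicit loops.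
import Mathlib
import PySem

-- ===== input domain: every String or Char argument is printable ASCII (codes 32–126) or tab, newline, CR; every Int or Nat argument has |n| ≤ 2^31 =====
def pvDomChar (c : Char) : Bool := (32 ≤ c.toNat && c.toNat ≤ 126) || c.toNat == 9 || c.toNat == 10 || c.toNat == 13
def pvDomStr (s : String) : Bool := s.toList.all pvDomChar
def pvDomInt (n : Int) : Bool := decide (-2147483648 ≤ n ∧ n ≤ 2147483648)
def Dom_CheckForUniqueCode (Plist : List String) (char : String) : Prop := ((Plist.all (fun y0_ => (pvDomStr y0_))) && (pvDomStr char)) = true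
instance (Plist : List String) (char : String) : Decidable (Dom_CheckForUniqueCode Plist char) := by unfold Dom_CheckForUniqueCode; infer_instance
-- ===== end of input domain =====

-- B replaces A's nested pairwise duplicate scan with a set-cardinality test plus one membership check (simpler).

-- ===== PORT A =====
-- inner loop: 'for j in range(i): if Plist[i] == Plist[j]: return False' — scans the prefix in order
def pvAinner (pre : List String) (x : String) : Bool :=
  match pre with
  | [] => false
  | p :: ps => if p == x then true else pvAinner ps x

-- outer loop over i: 'pre' is Plist[0:i] in order, 'rest' the elements still to visit
def pvAouter (char : String) (pre rest : List String) : Bool :=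
  match rest with
  | [] => true
  | x :: rest' =>
      if pvAinner pre x then false
      else if x == char then false
      else pvAouter char (pre ++ [x]) rest'

def CheckForUniqueCode (Plist : List String) (char : String) : Bool :=
  pvAouter char [] Plist

-- ===== PORT B =====
def CheckForUniqueCode_alt (Plist : List String) (char : String) : Bool :=
  ((PySem.Set.ofList Plist).length == Plist.length) && !(Plist.contains char)

-- ===== PRECONDITION & SPEC =====
def Spec_CheckForUniqueCode (Plist : List String) (char : String) (out : Bool) : Prop := out = CheckForUniqueCode_alt Plist char
instance (Plist : List String) (char : String) (out : Bool) : Decidable (Spec_CheckForUniqueCode Plist char out) := by unfold Spec_CheckForUniqueCode; infer_instance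

-- ===== CLAIM (what is proved, stated in full; the proofs are below) =====
def Claim_equal_CheckForUniqueCode : Prop := ∀ (Plist : List String) (char : String), Dom_CheckForUniqueCode Plist char → Spec_CheckForUniqueCode Plist char (CheckForUniqueCode Plist char)

-- ===== LEMMAS AND PROOFS =====

theorem pvAinner_eq_contains (pre : List String) (x : String) :
    pvAinner pre x = pre.contains x := by
  induction pre with
  | nil => rfl
  | cons p ps ih =>
      simp only [pvAinner, List.contains_cons]
      by_cases h : p = x
      · subst h; simp
      · have h1 : (p == x) = false := by simpa using h
        have h2 : (x == p) = false := by simpa using Ne.symm h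
        simp [h1, h2, ih]

theorem set_length_eq_iff_nodup (xs : List String) :
    ((PySem.Set.ofList xs).length == xs.length) = decide xs.Nodup := by
  by_cases h : xs.Nodup
  · simp [PySem.Set.ofList_eq_self_of_nodup xs h, h]
  · have hne : (PySem.Set.ofList xs).length ≠ xs.length := by
      intro heq
      apply h
      have hsub : PySem.Set.ofList xs ⊆ xs := fun {a} ha => (PySem.Set.mem_ofList xs a).mp ha
      have hsp : List.Subperm (PySem.Set.ofList xs) xs := (PySem.Set.nodup_ofList xs).subperm hsub
      have hperm : List.Perm (PySem.Set.ofList xs) xs := hsp.perm_of_length_le (le_of_eq heq.symm)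
      exact hperm.nodup_iff.mp (PySem.Set.nodup_ofList xs)
    simp [hne, h]

-- loop invariant for A: 'pre' is the already-scanned prefix, nodup and free of char
theorem pvAouter_char (char : String) :
    ∀ (rest pre : List String), pre.Nodup → char ∉ pre →
      pvAouter char pre rest
        = (decide (pre ++ rest).Nodup && !((pre ++ rest).contains char)) := by
  intro rest
  induction rest with
  | nil =>
      intro pre h1 h2
      simp [pvAouter, h1, h2]
  | cons x rest' ih =>
      intro pre h1 h2
      simp only [pvAouter, pvAinner_eq_contains]
      by_cases hx : x ∈ pre
      · have hnd : ¬ (pre ++ x :: rest').Nodup := fun hn =>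
          (List.nodup_append.mp hn).2.2 x hx x (List.mem_cons_self ..) rfl
        simp [hx, hnd]
      · have hxc : (pre.contains x) = false := by simpa using hx
        by_cases hc : x = char
        · subst hc
          simp
        · have hcb : (x == char) = false := by simpa using hc
          have hpre1 : (pre ++ [x]).Nodup := by
            exact List.nodup_append.mpr ⟨h1, List.nodup_singleton x,
              fun a ha b hb hab => hx ((hab.trans (List.mem_singleton.mp hb)) ▸ ha)⟩
          have hstep := ih (pre ++ [x]) hpre1 (by simp [h2, Ne.symm hc])
          simp only [List.append_assoc, List.cons_append, List.nil_append] at hstep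
          simp only [hxc, hcb, Bool.false_eq_true, if_false]
          exact hstep

-- ===== VERDICT (by name: the statement is the Claim_ definition above) =====
theorem CheckForUniqueCode_spec : Claim_equal_CheckForUniqueCode := by
  intro Plist char _
  unfold Spec_CheckForUniqueCode CheckForUniqueCode CheckForUniqueCode_alt
  rw [pvAouter_char char Plist [] List.nodup_nil (by simp)]
  rw [set_length_eq_iff_nodup]
  simp only [List.nil_append]
  rfl
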